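-- pv_equiv track=rewrite | github.com/Jaeyeop-Jung/CodingTest | 코딩테스트/토마토 스파게티 2023/6.py | solution
-- ===== SOURCE A (Python) =====
-- def solution(prices, k):
--     res = 0
--     for i in range(len(prices)):
--         cur = prices[i]
--         temp = sorted(prices[i + 1:])
--         cnt = 0
--         if len(temp) < k:
--             continue
--         for _ in range(k):
--             cnt += temp.pop() - cur
--         res = max(res, cnt)
--     return res if res != 0 else -1
-- ===== SOURCE B (Python) =====
-- def _insert_pos(xs, x):
--     # first index at which x can be inserted keeping xs (sorted ascending) sorted
--     i = 0
--     while i < len(xs) and xs[i] < x: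
--         i += 1
--     return i
--
--
-- def solution(prices, k):
--     if k <= 0:
--         return -1
--     res = 0
--     suffix = []  # the elements to the right of the current position, kept sorted ascending
--     for p in reversed(prices):
--         if len(suffix) >= k:
--             res = max(res, sum(suffix[len(suffix) - k:]) - k * p)
--         i = _insert_pos(suffix, p)
--         suffix = suffix[:i] + [p] + suffix[i:]
--     return res if res != 0 else -1
-- ===== Notes on version B (the rewrite author's own statement) =====
-- stated objective: faster
-- what changed: Replaces the per-index re-sort of every suffix (sorted(prices[i+1:]) plus k pops) by a single right-to-left pass that maintains the suffix as one incrementally updated sorted list (insertion-point scan + splice) and reads the top-k sum from its tail slice.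
import Mathlib
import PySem

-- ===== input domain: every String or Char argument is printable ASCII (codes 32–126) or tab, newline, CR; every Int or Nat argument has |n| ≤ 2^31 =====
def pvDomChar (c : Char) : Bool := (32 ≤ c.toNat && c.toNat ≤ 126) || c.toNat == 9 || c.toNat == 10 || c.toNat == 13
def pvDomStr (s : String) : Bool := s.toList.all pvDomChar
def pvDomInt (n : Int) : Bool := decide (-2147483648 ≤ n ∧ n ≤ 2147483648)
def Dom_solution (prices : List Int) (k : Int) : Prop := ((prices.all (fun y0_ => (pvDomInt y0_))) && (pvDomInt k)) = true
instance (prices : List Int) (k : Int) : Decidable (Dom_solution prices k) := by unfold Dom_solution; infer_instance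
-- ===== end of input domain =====

-- B replaces A's per-index re-sort of every suffix by a single right-to-left pass that keeps the
-- suffix as one incrementally updated sorted list; same return value, faster by a constant factor.

-- ===== PORT A =====
def solution (prices : List Int) (k : Int) : Int :=
  let res := (PySem.List.pyRange 0 (PySem.List.len prices) 1).foldl (fun res i =>
    let cur := PySem.List.pyGetD prices i 0      -- prices[i]; i ranges over 0..len-1, always in range
    let temp := PySem.List.sorted (PySem.List.slice prices (some (i + 1)) none) (fun x => x) false
    if PySem.List.len temp < k then res
    else
      let r := (PySem.List.pyRange 0 k 1).foldl (fun (s : List Int × Int) _ =>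
        let pr := (PySem.List.pop? s.1).getD (0, [])   -- temp.pop(); never empty under the length guard
        (pr.2, s.2 + pr.1 - cur)) (temp, 0)
      max res r.2) 0
  if res ≠ 0 then res else -1

-- ===== PORT B =====
-- port of Source B's _insert_pos: the while loop scanning for the first index with xs[i] >= x
def insertPos (xs : List Int) (x : Int) : Nat :=
  match xs with
  | [] => 0
  | y :: t => if y < x then insertPos t x + 1 else 0

def solution_alt (prices : List Int) (k : Int) : Int :=
  if k ≤ 0 then -1
  else
    let st := prices.reverse.foldl (fun (s : Int × List Int) p =>
      let res := if k ≤ PySem.List.len s.2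
        then max s.1 ((PySem.List.slice s.2 (some (PySem.List.len s.2 - k)) none).sum - k * p)
        else s.1
      let i := insertPos s.2 p
      (res, PySem.List.slice s.2 none (some (i : Int)) ++ [p] ++ PySem.List.slice s.2 (some (i : Int)) none))
      (0, ([] : List Int))
    if st.1 ≠ 0 then st.1 else -1

-- ===== PRECONDITION & SPEC =====
def Spec_solution (prices : List Int) (k : Int) (out : Int) : Prop := out = solution_alt prices k
instance (prices : List Int) (k : Int) (out : Int) : Decidable (Spec_solution prices k out) := by unfold Spec_solution; infer_instance

-- ===== CLAIM (what is proved, stated in full; the proofs are below) =====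
def Claim_equal_solution : Prop := ∀ (prices : List Int) (k : Int), Dom_solution prices k → Spec_solution prices k (solution prices k)

-- ===== LEMMAS AND PROOFS =====

-- sum of the k largest elements of suf (tail of the sorted suffix)
def topsum (k : Int) (suf : List Int) : Int :=
  ((PySem.List.sorted suf (fun x => x) false).drop (suf.length - k.toNat)).sum

-- one step of the shared reference recursion: A's "skip if short, else max with candidate"
def branch (k res p : Int) (suf : List Int) : Int :=
  if ((suf.length : Int)) < k then res else max res (topsum k suf - k * p)

-- reference value: right-recursive max over all admissible positions (B's orientation)
def resR (k : Int) : List Int → Int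
  | [] => 0
  | p :: suf => branch k (resR k suf) p suf

-- A's loop orientation: left accumulation over positions
def bestAux (k res : Int) : List Int → Int
  | [] => res
  | p :: suf => bestAux k (branch k res p suf) suf

-- A's loop body at natural index j, in pure form
def AbodyN (k : Int) (l : List Int) (r : Int) (j : Nat) : Int :=
  if (((l.drop (j + 1)).length : Int)) < k then r
  else max r (topsum k (l.drop (j + 1)) - k * l.getD j 0)

-- the spliced list B builds: suffix[:i] + [p] + suffix[i:]
def sIns (s : List Int) (p : Int) : List Int :=
  s.take (insertPos s p) ++ [p] ++ s.drop (insertPos s p)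

lemma sIns_cons (y : Int) (t : List Int) (p : Int) :
    sIns (y :: t) p = if y < p then y :: sIns t p else p :: y :: t := by
  unfold sIns
  rw [insertPos]
  split <;> simp

lemma sIns_perm (s : List Int) (p : Int) : (sIns s p).Perm (p :: s) := by
  induction s with
  | nil => simp [sIns, insertPos]
  | cons y t ih =>
    rw [sIns_cons]
    split
    · exact (ih.cons y).trans (List.Perm.swap p y t)
    · exact List.Perm.refl _

lemma sIns_mem (s : List Int) (p a : Int) : a ∈ sIns s p ↔ a = p ∨ a ∈ s := by
  rw [(sIns_perm s p).mem_iff]; simp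

lemma sIns_pairwise (s : List Int) (p : Int) (h : s.Pairwise (· ≤ ·)) :
    (sIns s p).Pairwise (· ≤ ·) := by
  induction s with
  | nil => simp [sIns, insertPos]
  | cons y t ih =>
    rw [List.pairwise_cons] at h
    rw [sIns_cons]
    split
    · rename_i hy
      rw [List.pairwise_cons]
      refine ⟨?_, ih h.2⟩
      intro a ha
      rcases (sIns_mem t p a).mp ha with rfl | ha'
      · exact le_of_lt hy
      · exact h.1 a ha'
    · rename_i hy
      rw [List.pairwise_cons]
      refine ⟨?_, List.pairwise_cons.mpr h⟩
      intro a ha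
      rcases List.mem_cons.mp ha with rfl | ha'
      · exact not_lt.mp hy
      · exact le_trans (not_lt.mp hy) (h.1 a ha')

-- splicing p into a sorted list at Source B's insertion point is sorting p into the list
lemma sIns_sorted (l : List Int) (p : Int) :
    sIns (PySem.List.sorted l (fun x => x) false) p = PySem.List.sorted (p :: l) (fun x => x) false := by
  refine (PySem.List.sorted_id_eq_of_perm_of_pairwise _ _ ?_ ?_).symm
  · exact (sIns_perm _ p).trans ((PySem.List.sorted_perm l _ _).cons p)
  · exact sIns_pairwise _ p (PySem.List.sorted_pairwise l _)

-- A's inner pop loop: m pops from the end of t accumulate the sum of t's last m elements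
lemma popLoop (t : List Int) (cur c : Int) (m : Nat) (hm : m ≤ t.length) :
    (PySem.List.pyRange 0 (m : Int) 1).foldl (fun (s : List Int × Int) _ =>
        let pr := (PySem.List.pop? s.1).getD (0, [])
        (pr.2, s.2 + pr.1 - cur)) (t, c)
      = (t.take (t.length - m), c + (t.drop (t.length - m)).sum - m * cur) := by
  induction m with
  | zero => simp [PySem.List.pyRange_one_eq_nil (le_refl 0)]
  | succ m ih =>
    have hm' : m ≤ t.length := Nat.le_of_succ_le hm
    have hcast : ((m + 1 : Nat) : Int) = (m : Int) + 1 := by push_cast; ring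
    rw [hcast, PySem.List.pyRange_one_succ_right (by positivity), List.foldl_append, ih hm']
    have hj : t.length - m = (t.length - (m + 1)) + 1 := by omega
    have hjl : t.length - (m + 1) < t.length := by omega
    have htake : t.take (t.length - m) = t.take (t.length - (m + 1)) ++ [t[t.length - (m + 1)]] := by
      rw [hj, List.take_add_one, List.getElem?_eq_getElem hjl]
      simp
    have hdrop : t.drop (t.length - (m + 1)) = t[t.length - (m + 1)] :: t.drop (t.length - m) := by
      rw [hj]
      exact List.drop_eq_getElem_cons hjl
    simp only [List.foldl_cons, List.foldl_nil, htake, PySem.List.pop?_last, Option.getD_some]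
    rw [hdrop]
    simp only [List.sum_cons]
    rw [Prod.mk.injEq]
    exact ⟨rfl, by ring⟩

-- A's loop body at index j equals its pure form
lemma Abody_eq (k : Int) (hk : 0 < k) (l : List Int) (r : Int) (j : Nat) :
    (fun res i =>
      let cur := PySem.List.pyGetD l i 0
      let temp := PySem.List.sorted (PySem.List.slice l (some (i + 1)) none) (fun x => x) false
      if PySem.List.len temp < k then res
      else
        let rr := (PySem.List.pyRange 0 k 1).foldl (fun (s : List Int × Int) _ =>
          let pr := (PySem.List.pop? s.1).getD (0, [])
          (pr.2, s.2 + pr.1 - cur)) (temp, 0)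
        max res rr.2) r ((j : Nat) : Int) = AbodyN k l r j := by
  have hj1 : ((j : Int)) + 1 = ((j + 1 : Nat) : Int) := by push_cast; ring
  unfold AbodyN
  simp only [PySem.List.pyGetD_natCast, PySem.List.len_eq, PySem.List.length_sorted, hj1,
    PySem.List.slice_from_natCast, List.length_drop]
  split
  · rfl
  · rename_i hc
    have hk0 : k = ((k.toNat : Nat) : Int) := (Int.toNat_of_nonneg hk.le).symm
    have hm : k.toNat ≤ (PySem.List.sorted (l.drop (j + 1)) (fun x => x) false).length := by
      rw [PySem.List.length_sorted, List.length_drop]; omega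
    rw [hk0, popLoop _ _ _ _ hm]
    simp only [topsum, PySem.List.length_sorted, List.length_drop, ← hk0]
    ring_nf

-- folding A's pure body over all indices is the reference recursion, A's orientation
lemma rangeFold (k : Int) (l : List Int) : ∀ res : Int,
    (List.range l.length).foldl (AbodyN k l) res = bestAux k res l := by
  induction l with
  | nil => intro res; simp [bestAux]
  | cons p suf ih =>
    intro res
    rw [List.length_cons, List.range_succ_eq_map, List.foldl_cons, List.foldl_map]
    have hshift : ∀ (r : Int) (j : Nat), j ∈ List.range suf.length →
        (fun (x : Int) (y : Nat) => AbodyN k (p :: suf) x y.succ) r j = AbodyN k suf r j := by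
      intro r j _
      unfold AbodyN
      simp [Nat.succ_eq_add_one, List.drop_succ_cons, List.getD]
    rw [PySem.List.foldl_congr_mem _ _ _ _ hshift, ih]
    have h0 : AbodyN k (p :: suf) res 0 = branch k res p suf := by
      unfold AbodyN branch
      simp [List.getD]
    rw [h0]
    rfl

lemma branch_le (k res p : Int) (suf : List Int) : res ≤ branch k res p suf := by
  unfold branch; split <;> simp

lemma resR_nonneg (k : Int) (l : List Int) : 0 ≤ resR k l := by
  induction l with
  | nil => simp [resR]
  | cons p suf ih => exact le_trans ih (branch_le k _ p suf)

-- left accumulation from a nonnegative start is the max with the right-recursive value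
lemma bestAux_eq_max (k : Int) (l : List Int) : ∀ res : Int, 0 ≤ res →
    bestAux k res l = max res (resR k l) := by
  induction l with
  | nil => intro res h; simp [bestAux, resR]; omega
  | cons p suf ih =>
    intro res h
    show bestAux k (branch k res p suf) suf = max res (branch k (resR k suf) p suf)
    rw [ih _ (le_trans h (branch_le k res p suf))]
    unfold branch
    split
    · rfl
    · rw [max_assoc, max_comm (resR k suf)]

-- B's fold state after consuming l (right fold = reversed-left fold): reference value and sorted suffix
lemma B_state (k : Int) (hk : 0 < k) (l : List Int) :
    l.foldr (fun p (s : Int × List Int) =>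
      ((if k ≤ PySem.List.len s.2
        then max s.1 ((PySem.List.slice s.2 (some (PySem.List.len s.2 - k)) none).sum - k * p)
        else s.1),
       PySem.List.slice s.2 none (some ((insertPos s.2 p : Nat) : Int)) ++ [p] ++
         PySem.List.slice s.2 (some ((insertPos s.2 p : Nat) : Int)) none)) (0, ([] : List Int))
      = (resR k l, PySem.List.sorted l (fun x => x) false) := by
  induction l with
  | nil =>
    rw [List.foldr_nil, Prod.mk.injEq]
    exact ⟨rfl, rfl⟩
  | cons p suf ih =>
    rw [List.foldr_cons, ih]
    dsimp only
    rw [Prod.mk.injEq]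
    constructor
    · rw [PySem.List.len_eq, PySem.List.length_sorted]
      simp only [resR]
      unfold branch
      by_cases hc : ((suf.length : Int)) < k
      · rw [if_neg (not_le.mpr hc), if_pos hc]
      · rw [if_pos (not_lt.mp hc), if_neg hc]
        have ha : (0 : Int) ≤ (suf.length : Int) - k := by omega
        rw [PySem.List.slice_from _ ha]
        have htn : ((suf.length : Int) - k).toNat = suf.length - k.toNat := by omega
        rw [htn]
        simp [topsum]
    · rw [PySem.List.slice_to_natCast, PySem.List.slice_from_natCast]
      exact sIns_sorted suf p

lemma foldl_max_zero (L : List Int) : L.foldl (fun (r : Int) (_ : Int) => max r 0) 0 = 0 := by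
  induction L with
  | nil => rfl
  | cons x t ih => simpa using ih

-- A's value for positive k, via the reference recursion
lemma A_val (k : Int) (hk : 0 < k) (l : List Int) :
    solution l k = (if resR k l ≠ 0 then resR k l else -1) := by
  unfold solution
  simp only []
  rw [PySem.List.len_eq, PySem.List.pyRange_zero_nat, List.foldl_map]
  rw [PySem.List.foldl_congr_mem _ _ (AbodyN k l) _ (fun r j _ => Abody_eq k hk l r j)]
  rw [rangeFold k l 0, bestAux_eq_max k l 0 le_rfl]
  rw [max_eq_right (resR_nonneg k l)]

-- for k ≤ 0 the guard never skips, the pop loop is empty, res stays 0, A returns -1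
lemma A_nonpos (k : Int) (hk : k ≤ 0) (l : List Int) : solution l k = -1 := by
  unfold solution
  have hbody : ∀ (r i : Int),
      (fun res i =>
        let cur := PySem.List.pyGetD l i 0
        let temp := PySem.List.sorted (PySem.List.slice l (some (i + 1)) none) (fun x => x) false
        if PySem.List.len temp < k then res
        else
          let rr := (PySem.List.pyRange 0 k 1).foldl (fun (s : List Int × Int) _ =>
            let pr := (PySem.List.pop? s.1).getD (0, [])
            (pr.2, s.2 + pr.1 - cur)) (temp, 0)
          max res rr.2) r i = max r 0 := by
    intro r i
    simp only [PySem.List.len_eq]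
    rw [if_neg (not_lt.mpr (le_trans hk (by positivity)))]
    rw [PySem.List.pyRange_one_eq_nil hk]
    simp
  simp only []
  rw [PySem.List.foldl_congr_mem _ _ (fun (r : Int) (_ : Int) => max r 0) _ (fun r i _ => hbody r i)]
  rw [foldl_max_zero]
  decide

-- ===== VERDICT (by name: the statement is the Claim_ definition above) =====
theorem solution_spec : Claim_equal_solution := by
  intro prices k _
  unfold Spec_solution solution_alt
  by_cases hk : k ≤ 0
  · simp [hk, A_nonpos k hk prices]
  · rw [not_le] at hk
    rw [A_val k hk prices]
    simp only [if_neg (not_le.mpr hk)]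
    rw [List.foldl_reverse]
    rw [B_state k hk prices]
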